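-- pv_equiv track=rewrite | github.com/AtomTools/Multi-tools | utils/theme.py | redorange
-- ===== SOURCE A (Python) =====
-- def redorange(text):
--     faded = ""
--     green = 0
--     for line in text.splitlines():
--         faded += f"\033[38;2;255;{green};0m{line}\033[0m\n"
--         if green < 165:
--             green += 15
--             if green > 165:
--                 green = 165
--     return faded
-- ===== SOURCE B (Python) =====
-- GRADIENT = [0, 15, 30, 45, 60, 75, 90, 105, 120, 135, 150, 165]
--
-- def redorange(text):
--     lines = text.splitlines()
--     head = [f"\033[38;2;255;{g};0m{line}\033[0m\n" for g, line in zip(GRADIENT, lines)]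
--     tail = [f"\033[38;2;255;165;0m{line}\033[0m\n" for line in lines[len(GRADIENT):]]
--     return "".join(head + tail)
-- ===== Notes on version B (the rewrite author's own statement) =====
-- stated objective: alternative
-- what changed: Replaced the stateful increment-and-clamp green counter by a precomputed 12-entry gradient table zipped with the leading lines plus a constant-color pass over the remaining lines, joined in one step.
import Mathlib
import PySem

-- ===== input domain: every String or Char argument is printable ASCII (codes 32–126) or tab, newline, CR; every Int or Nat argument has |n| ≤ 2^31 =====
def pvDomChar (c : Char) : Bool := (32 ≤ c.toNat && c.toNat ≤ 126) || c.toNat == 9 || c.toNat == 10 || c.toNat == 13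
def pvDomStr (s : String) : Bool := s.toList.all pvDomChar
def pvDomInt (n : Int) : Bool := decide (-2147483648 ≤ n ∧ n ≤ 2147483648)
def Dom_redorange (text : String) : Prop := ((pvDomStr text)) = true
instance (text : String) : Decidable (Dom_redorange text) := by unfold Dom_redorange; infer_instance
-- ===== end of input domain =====

-- B replaces the stateful increment-and-clamp green counter by a precomputed 12-entry
-- gradient table zipped with the leading lines plus a constant-color pass over the rest;
-- same cost, different decomposition.

-- ===== PORT A =====
def redorange (text : String) : String :=
  ((PySem.Str.splitlines text).foldl (fun (st : String × Int) line =>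
    let faded := st.1 ++ "\x1B[38;2;255;" ++ PySem.Int.toStr st.2 ++ ";0m" ++ line ++ "\x1B[0m\n"
    let green := if st.2 < 165 then
        (if st.2 + 15 > 165 then (165 : Int) else st.2 + 15)
      else st.2
    (faded, green)) ("", 0)).1

-- ===== PORT B =====
def pvGradient : List Int := [0, 15, 30, 45, 60, 75, 90, 105, 120, 135, 150, 165]

def pvFmt (g : Int) (line : String) : String :=
  "\x1B[38;2;255;" ++ PySem.Int.toStr g ++ ";0m" ++ line ++ "\x1B[0m\n"

def redorange_alt (text : String) : String :=
  let lines := PySem.Str.splitlines text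
  let head := (pvGradient.zip lines).map (fun p => pvFmt p.1 p.2)
  let tail := (lines.drop pvGradient.length).map (fun line => pvFmt 165 line)
  PySem.Str.join "" (head ++ tail)

-- ===== PRECONDITION & SPEC =====
def Spec_redorange (text : String) (out : String) : Prop := out = redorange_alt text
instance (text : String) (out : String) : Decidable (Spec_redorange text out) := by unfold Spec_redorange; infer_instance

-- ===== CLAIM (what is proved, stated in full; the proofs are below) =====
def Claim_equal_redorange : Prop := ∀ (text : String), Dom_redorange text → Spec_redorange text (redorange text)

-- ===== LEMMAS AND PROOFS =====

lemma intercalate_nil_cons (a : List Char) (rest : List (List Char)) :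
    List.intercalate [] (a :: rest) = a ++ List.intercalate [] rest := by
  induction rest <;> simp_all [List.intercalate, List.intersperse]

lemma join_empty_cons (a : String) (rest : List String) :
    PySem.Str.join "" (a :: rest) = a ++ PySem.Str.join "" rest := by
  simp [PySem.Str.join, PySem.Chars.join, intercalate_nil_cons]

lemma gradient_drop (k : Nat) (hk : k < 12) :
    pvGradient.drop k = ((15 * k : Nat) : Int) :: pvGradient.drop (k + 1) := by
  interval_cases k <;> decide

lemma green_val (k : Nat) (hk : k < 12) :
    min ((k : Int) * 15) 165 = ((15 * k : Nat) : Int) := by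
  push_cast; omega

lemma green_step (k : Nat) :
    (if min ((k : Int) * 15) 165 < 165 then
        (if min ((k : Int) * 15) 165 + 15 > 165 then (165 : Int) else min ((k : Int) * 15) 165 + 15)
      else min ((k : Int) * 15) 165) = min (((min (k + 1) 12 : Nat) : Int) * 15) 165 := by
  rcases Nat.lt_or_ge k 12 with h | h
  · have : min (k + 1) 12 = k + 1 := by omega
    rw [this]; push_cast; omega
  · have : min (k + 1) 12 = 12 := by omega
    rw [this]; push_cast; omega

lemma redorange_loop (ls : List String) (acc : String) (k : Nat) (hk : k ≤ 12) :
    (ls.foldl (fun (st : String × Int) line =>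
        let faded := st.1 ++ "\x1B[38;2;255;" ++ PySem.Int.toStr st.2 ++ ";0m" ++ line ++ "\x1B[0m\n"
        let green := if st.2 < 165 then
            (if st.2 + 15 > 165 then (165 : Int) else st.2 + 15)
          else st.2
        (faded, green)) (acc, min ((k : Int) * 15) 165)).1
      = acc ++ PySem.Str.join ""
          (((pvGradient.drop k).zip ls).map (fun p => pvFmt p.1 p.2)
            ++ (ls.drop (12 - k)).map (fun line => pvFmt 165 line)) := by
  induction ls generalizing acc k with
  | nil => simp [PySem.Str.join, PySem.Chars.join, List.intercalate]
  | cons l ls ih =>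
    simp only [List.foldl_cons, green_step]
    have h := ih (acc ++ "\x1B[38;2;255;" ++ PySem.Int.toStr (min ((k : Int) * 15) 165) ++ ";0m" ++ l ++ "\x1B[0m\n")
      (min (k + 1) 12) (by omega)
    rw [h]
    rcases lt_or_ge k 12 with hlt | hge
    · have hmin : min (k + 1) 12 = k + 1 := by omega
      rw [hmin, gradient_drop k hlt, green_val k hlt]
      have hd : (l :: ls).drop (12 - k) = ls.drop (12 - (k + 1)) := by
        have : 12 - k = (12 - (k + 1)) + 1 := by omega
        rw [this]; rfl
      simp [hd, join_empty_cons, pvFmt, String.append_assoc]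
    · have hk12 : k = 12 := by omega
      subst hk12
      have hmin : min (12 + 1) 12 = 12 := by omega
      rw [hmin]
      have hdrop : pvGradient.drop 12 = [] := by decide
      simp [hdrop, join_empty_cons, pvFmt, String.append_assoc]

-- ===== VERDICT (by name: the statement is the Claim_ definition above) =====
theorem redorange_spec : Claim_equal_redorange := by
  intro text _
  unfold Spec_redorange redorange redorange_alt
  have h := redorange_loop (PySem.Str.splitlines text) "" 0 (by omega)
  simpa [pvGradient] using h
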